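-- pv_equiv track=rewrite | github.com/Evan1108-Coder/AI-Debate-Council | backend/app/analytics.py | _role_label
-- ===== SOURCE A (Python) =====
-- def _role_label(role: str) -> str:
--     if role.startswith("pro_"):
--         return f"Pro {_role_label(role.removeprefix('pro_'))}"
--     if role.startswith("con_"):
--         return f"Con {_role_label(role.removeprefix('con_'))}"
--     return {
--         "advocate": "Advocate",
--         "critic": "Critic",
--         "researcher": "Researcher",
--         "devils_advocate": "Devil's Advocate",
--         "lead_advocate": "Advocate",
--         "rebuttal_critic": "Rebuttal Critic",
--         "evidence_researcher": "Evidence Researcher",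
--         "cross_examiner": "Cross-Examiner",
--     }.get(role, role.replace("_", " ").title())
-- ===== SOURCE B (Python) =====
-- _BASE = {
--     "advocate": "Advocate",
--     "critic": "Critic",
--     "researcher": "Researcher",
--     "devils_advocate": "Devil's Advocate",
--     "lead_advocate": "Advocate",
--     "rebuttal_critic": "Rebuttal Critic",
--     "evidence_researcher": "Evidence Researcher",
--     "cross_examiner": "Cross-Examiner",
-- }
--
--
-- def _role_label(role: str) -> str:
--     prefixes = []
--     while True:
--         if role.startswith("pro_"):
--             prefixes.append("Pro")
--             role = role[4:]
--         elif role.startswith("con_"):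
--             prefixes.append("Con")
--             role = role[4:]
--         else:
--             break
--     result = _BASE.get(role, role.replace("_", " ").title())
--     for p in reversed(prefixes):
--         result = f"{p} {result}"
--     return result
-- ===== Notes on version B (the rewrite author's own statement) =====
-- stated objective: alternative
-- what changed: Replaces A's recursion on the 'pro_'/'con_' prefixes by an iterative loop that strips the prefixes while collecting their labels, then looks up the base label once and folds the collected labels back on from innermost to outermost.
import Mathlib
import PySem

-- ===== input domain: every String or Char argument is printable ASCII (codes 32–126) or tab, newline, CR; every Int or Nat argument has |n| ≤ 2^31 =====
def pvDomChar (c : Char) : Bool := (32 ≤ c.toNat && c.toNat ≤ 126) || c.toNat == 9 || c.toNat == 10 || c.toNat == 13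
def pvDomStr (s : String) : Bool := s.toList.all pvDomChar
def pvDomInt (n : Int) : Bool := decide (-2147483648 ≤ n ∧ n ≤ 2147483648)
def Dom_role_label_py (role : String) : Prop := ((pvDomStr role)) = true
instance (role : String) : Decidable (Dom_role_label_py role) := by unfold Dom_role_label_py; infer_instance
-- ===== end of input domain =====

-- B replaces A's recursion on the 'pro_'/'con_' prefixes by an iterative loop that collects
-- the prefix labels and folds them back onto the base label afterwards (objective: alternative).

-- ===== PORT A =====
-- shared helper: str.title(), ported by hand char by char — exact on the ASCII domain
-- (a letter is uppercased after a non-letter and lowercased after a letter)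
def pyTitleGo : Bool → List Char → List Char
  | _, [] => []
  | prevCased, c :: rest =>
      (if prevCased then c.toLower else c.toUpper) :: pyTitleGo c.isAlpha rest

-- shared helper: the dict literal and its .get with the .replace/.title fallback
def roleDict : PySem.Dict (List Char) (List Char) :=
  PySem.Dict.ofList [
    ("advocate".toList, "Advocate".toList),
    ("critic".toList, "Critic".toList),
    ("researcher".toList, "Researcher".toList),
    ("devils_advocate".toList, "Devil's Advocate".toList),
    ("lead_advocate".toList, "Advocate".toList),
    ("rebuttal_critic".toList, "Rebuttal Critic".toList),
    ("evidence_researcher".toList, "Evidence Researcher".toList),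
    ("cross_examiner".toList, "Cross-Examiner".toList)]

def baseLabel (cs : List Char) : List Char :=
  roleDict.getD cs (pyTitleGo false (PySem.Chars.replace cs "_".toList " ".toList))

theorem startswith_four_le {cs : List Char} {p : List Char} (hp : p.length = 4)
    (h : PySem.Chars.startswith cs p = true) : 4 ≤ cs.length := by
  have := ((PySem.Chars.startswith_iff cs p).mp h).length_le
  omega

def roleLabelChars (cs : List Char) : List Char :=
  if h : PySem.Chars.startswith cs "pro_".toList then
    "Pro ".toList ++ roleLabelChars (cs.drop 4)
  else if h2 : PySem.Chars.startswith cs "con_".toList then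
    "Con ".toList ++ roleLabelChars (cs.drop 4)
  else baseLabel cs
termination_by cs.length
decreasing_by
  · have := startswith_four_le (by decide) h; simp; omega
  · have := startswith_four_le (by decide) h2; simp; omega

def role_label_py (role : String) : String :=
  String.ofList (roleLabelChars role.toList)

-- ===== PORT B =====
-- the while-loop: strip 'pro_'/'con_' prefixes, collecting their labels in order
def collectGo (cs : List Char) (acc : List (List Char)) : List (List Char) × List Char :=
  if h : PySem.Chars.startswith cs "pro_".toList then
    collectGo (cs.drop 4) (acc ++ ["Pro".toList])
  else if h2 : PySem.Chars.startswith cs "con_".toList then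
    collectGo (cs.drop 4) (acc ++ ["Con".toList])
  else (acc, cs)
termination_by cs.length
decreasing_by
  · have := startswith_four_le (by decide) h; simp; omega
  · have := startswith_four_le (by decide) h2; simp; omega

-- "for p in reversed(prefixes): result = f'{p} {result}'"
def foldBack (ps : List (List Char)) (r : List Char) : List Char :=
  ps.reverse.foldl (fun r p => p ++ ' ' :: r) r

def role_label_py_alt (role : String) : String :=
  let pr := collectGo role.toList []
  String.ofList (foldBack pr.1 (baseLabel pr.2))

-- ===== PRECONDITION & SPEC =====
def Spec_role_label_py (role : String) (out : String) : Prop := out = role_label_py_alt role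
instance (role : String) (out : String) : Decidable (Spec_role_label_py role out) := by unfold Spec_role_label_py; infer_instance

-- ===== CLAIM (what is proved, stated in full; the proofs are below) =====
def Claim_equal_role_label_py : Prop := ∀ (role : String), Dom_role_label_py role → Spec_role_label_py role (role_label_py role)

-- ===== LEMMAS AND PROOFS =====
theorem collect_fold (cs : List Char) (acc : List (List Char)) :
    foldBack (collectGo cs acc).1 (baseLabel (collectGo cs acc).2)
      = foldBack acc (roleLabelChars cs) := by
  induction cs, acc using collectGo.induct with
  | case1 cs acc h ih =>
      rw [collectGo, dif_pos h, roleLabelChars, dif_pos h, ih]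
      simp [foldBack]
  | case2 cs acc h h2 ih =>
      rw [collectGo, dif_neg h, dif_pos h2, roleLabelChars, dif_neg h, dif_pos h2, ih]
      simp [foldBack]
  | case3 cs acc h h2 =>
      rw [collectGo, dif_neg h, dif_neg h2]
      rw [roleLabelChars, dif_neg h, dif_neg h2]

-- ===== VERDICT (by name: the statement is the Claim_ definition above) =====
theorem role_label_py_spec : Claim_equal_role_label_py := by
  intro role _
  unfold Spec_role_label_py role_label_py role_label_py_alt
  show String.ofList (roleLabelChars role.toList)
      = String.ofList (foldBack (collectGo role.toList []).1 (baseLabel (collectGo role.toList []).2))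
  rw [collect_fold role.toList []]
  rfl
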